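-- pv_equiv track=rewrite | github.com/MichaelYang-lyx/AIDABench | count_input_files.py | count_by_file_number
-- ===== SOURCE A (Python) =====
-- def count_by_file_number(results):
--     """
--     按input_file数量分组统计
--     返回：0个文件、1个文件、2个文件、>=3个文件的数据条数
--     """
--     count_0 = 0
--     count_1 = 0
--     count_2 = 0
--     count_3_plus = 0
--
--     for item in results:
--         file_count = item['file_count']
--         if file_count == 0:
--             count_0 += 1
--         elif file_count == 1:
--             count_1 += 1
--         elif file_count == 2:
--             count_2 += 1
--         elif file_count >= 3:
--             count_3_plus += 1
--
--     return {
--         'count_0_file': count_0,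
--         'count_1_file': count_1,
--         'count_2_files': count_2,
--         'count_3plus_files': count_3_plus
--     }
-- ===== SOURCE B (Python) =====
-- def count_by_file_number(results):
--     items = list(results)
--     return {
--         'count_0_file': sum(1 for it in items if it['file_count'] == 0),
--         'count_1_file': sum(1 for it in items if it['file_count'] == 1),
--         'count_2_files': sum(1 for it in items if it['file_count'] == 2),
--         'count_3plus_files': sum(1 for it in items if it['file_count'] >= 3),
--     }
-- ===== Notes on version B (the rewrite author's own statement) =====
-- stated objective: alternative
-- what changed: Replaces A's single loop carrying four counters with four independent one-predicate count passes over the materialized list, one per output field.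
import Mathlib
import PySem

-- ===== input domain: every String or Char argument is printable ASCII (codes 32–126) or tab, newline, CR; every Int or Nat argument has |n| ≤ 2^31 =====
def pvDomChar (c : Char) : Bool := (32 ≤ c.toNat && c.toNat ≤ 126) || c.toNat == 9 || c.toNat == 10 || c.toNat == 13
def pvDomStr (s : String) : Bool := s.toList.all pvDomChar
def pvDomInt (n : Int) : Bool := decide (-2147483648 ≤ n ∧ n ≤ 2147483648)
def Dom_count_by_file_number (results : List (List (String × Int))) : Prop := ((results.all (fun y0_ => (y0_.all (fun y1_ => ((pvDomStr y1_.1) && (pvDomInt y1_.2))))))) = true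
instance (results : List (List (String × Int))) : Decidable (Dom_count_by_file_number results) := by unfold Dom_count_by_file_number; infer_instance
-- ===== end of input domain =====

-- B computes each of the four buckets by its own counting pass instead of A's
-- single loop over four counters; same O(n) cost, different decomposition.

-- ===== PORT A =====
-- item['file_count']: first match in the assoc list; total form, exact under Pre_ (key present)
def pvFC (item : List (String × Int)) : Int := (PySem.Dict.mk item).getD "file_count" 0

def count_by_file_number (results : List (List (String × Int))) : List (String × Int) :=
  let s := results.foldl (fun (c : Int × Int × Int × Int) item =>
    let fc := pvFC item
    if fc = 0 then (c.1 + 1, c.2.1, c.2.2.1, c.2.2.2)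
    else if fc = 1 then (c.1, c.2.1 + 1, c.2.2.1, c.2.2.2)
    else if fc = 2 then (c.1, c.2.1, c.2.2.1 + 1, c.2.2.2)
    else if 3 ≤ fc then (c.1, c.2.1, c.2.2.1, c.2.2.2 + 1)
    else c) (0, 0, 0, 0)
  [("count_0_file", s.1), ("count_1_file", s.2.1),
   ("count_2_files", s.2.2.1), ("count_3plus_files", s.2.2.2)]

-- ===== PORT B =====
def count_by_file_number_alt (results : List (List (String × Int))) : List (String × Int) :=
  let items := results
  [("count_0_file", (items.countP (fun it => pvFC it = 0) : Int)),
   ("count_1_file", (items.countP (fun it => pvFC it = 1) : Int)),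
   ("count_2_files", (items.countP (fun it => pvFC it = 2) : Int)),
   ("count_3plus_files", (items.countP (fun it => 3 ≤ pvFC it) : Int))]

-- ===== PRECONDITION & SPEC =====
-- Pre_ excludes inputs where some item lacks the key 'file_count' (Python A raises KeyError there)
def Pre_count_by_file_number (results : List (List (String × Int))) : Prop :=
  (results.all (fun item => (PySem.Dict.mk item).contains "file_count")) = true
instance (results : List (List (String × Int))) : Decidable (Pre_count_by_file_number results) := by
  unfold Pre_count_by_file_number; infer_instance

def pvWitness_count_by_file_number : (List (List (String × Int))) :=
  [[("file_count", 0)], [("file_count", 3)], [("file_count", 1), ("x", 5)]]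

def Spec_count_by_file_number (results : List (List (String × Int))) (out : List (String × Int)) : Prop := out = count_by_file_number_alt results
instance (results : List (List (String × Int))) (out : List (String × Int)) : Decidable (Spec_count_by_file_number results out) := by unfold Spec_count_by_file_number; infer_instance

-- ===== CLAIM (what is proved, stated in full; the proofs are below) =====
def Claim_equal_count_by_file_number : Prop := ∀ (results : List (List (String × Int))), Dom_count_by_file_number results → Pre_count_by_file_number results → Spec_count_by_file_number results (count_by_file_number results)

-- ===== LEMMAS AND PROOFS =====
theorem count_foldl (results : List (List (String × Int))) (c0 c1 c2 c3 : Int) :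
    results.foldl (fun (c : Int × Int × Int × Int) item =>
      let fc := pvFC item
      if fc = 0 then (c.1 + 1, c.2.1, c.2.2.1, c.2.2.2)
      else if fc = 1 then (c.1, c.2.1 + 1, c.2.2.1, c.2.2.2)
      else if fc = 2 then (c.1, c.2.1, c.2.2.1 + 1, c.2.2.2)
      else if 3 ≤ fc then (c.1, c.2.1, c.2.2.1, c.2.2.2 + 1)
      else c) (c0, c1, c2, c3)
    = (c0 + (results.countP (fun it => pvFC it = 0) : Int),
       c1 + (results.countP (fun it => pvFC it = 1) : Int),
       c2 + (results.countP (fun it => pvFC it = 2) : Int),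
       c3 + (results.countP (fun it => 3 ≤ pvFC it) : Int)) := by
  induction results generalizing c0 c1 c2 c3 with
  | nil => simp
  | cons hd tl ih =>
    simp only [List.foldl_cons]
    split_ifs with h0 h1 h2 h3 <;>
      rw [ih] <;>
      simp [*] <;> ring

-- ===== VERDICT (by name: the statement is the Claim_ definition above) =====
theorem count_by_file_number_spec : Claim_equal_count_by_file_number := by
  intro results _ _
  show _ = _
  simp [count_by_file_number, count_by_file_number_alt, count_foldl]
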